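-- pv_equiv track=rewrite | github.com/elimarmacena/est_basica | bibMedidas.py | setFreqAc
-- ===== SOURCE A (Python) =====
-- def setFreqAc(tbDados):
--     i = 0  # VAIRAVEL DE CONTROLE
--     ac = 0  # ACUMULADO
--     while i < len(tbDados):
--         ac += tbDados[i][1] #ACUMULADO + FREQUENCIA DO ATUAL
--         tbDados[i].append(ac) #ADICIONA A FREQUENCIA ACUMULADA ATE O PONTO
--         i += 1
--     return tbDados
-- ===== SOURCE B (Python) =====
-- def setFreqAc(tbDados):
--     remaining = sum(row[1] for row in tbDados)
--     for row in reversed(tbDados):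
--         row.append(remaining)
--         remaining -= row[1]
--     return tbDados
-- ===== Notes on version B (the rewrite author's own statement) =====
-- stated objective: alternative
-- what changed: Instead of a forward index loop with a running accumulator, B sums all frequencies once and then walks the rows in reverse, appending the remaining total and subtracting each row's frequency, so cumulative values are produced back-to-front by subtraction.
import Mathlib
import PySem

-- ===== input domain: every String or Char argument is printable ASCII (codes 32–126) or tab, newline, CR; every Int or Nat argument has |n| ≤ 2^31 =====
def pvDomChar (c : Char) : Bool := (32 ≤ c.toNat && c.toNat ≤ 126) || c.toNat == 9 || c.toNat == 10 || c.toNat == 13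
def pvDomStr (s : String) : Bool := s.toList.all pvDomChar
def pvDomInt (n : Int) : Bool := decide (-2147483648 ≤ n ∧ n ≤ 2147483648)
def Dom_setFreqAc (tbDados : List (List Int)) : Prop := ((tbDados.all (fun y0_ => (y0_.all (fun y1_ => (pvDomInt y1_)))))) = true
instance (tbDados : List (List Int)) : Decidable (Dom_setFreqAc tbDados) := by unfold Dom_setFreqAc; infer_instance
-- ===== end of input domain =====

-- B sums all frequencies once and then walks the rows in reverse, appending the remaining
-- total and subtracting each row's frequency, instead of A's forward index loop with a
-- running accumulator; same cost ("alternative"). Both A and B mutate the rows of tbDados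
-- in place identically; the equivalence proved is about the return value.


-- ===== PORT A =====
-- A's while loop over index i with running accumulator ac; tbDados[i][1] is pyGet? (raises
-- IndexError in Python when a row is shorter than 2 — excluded by Pre_; getD 0 there).
def setFreqAcGo (ac : Int) : List (List Int) → List (List Int)
  | [] => []
  | r :: rs =>
      let ac' := ac + (PySem.List.pyGet? r 1).getD 0
      (r ++ [ac']) :: setFreqAcGo ac' rs

def setFreqAc (tbDados : List (List Int)) : List (List Int) := setFreqAcGo 0 tbDados

-- ===== PORT B =====
-- the reversed(tbDados) loop: append the remaining total, subtract this row's frequency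
def setFreqAcBack (rem : Int) : List (List Int) → List (List Int)
  | [] => []
  | r :: rs => (r ++ [rem]) :: setFreqAcBack (rem - (PySem.List.pyGet? r 1).getD 0) rs

def setFreqAc_alt (tbDados : List (List Int)) : List (List Int) :=
  let total := (tbDados.map (fun r => (PySem.List.pyGet? r 1).getD 0)).sum
  (setFreqAcBack total tbDados.reverse).reverse

-- ===== PRECONDITION & SPEC =====
-- Pre_ excludes exactly the inputs on which Python A raises IndexError: a row shorter than 2,
-- where tbDados[i][1] fails.
def Pre_setFreqAc (tbDados : List (List Int)) : Prop :=
  ∀ r ∈ tbDados, 2 ≤ r.length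
instance (tbDados : List (List Int)) : Decidable (Pre_setFreqAc tbDados) := by
  unfold Pre_setFreqAc; infer_instance

def pvWitness_setFreqAc : List (List Int) := [[1, 2], [3, 4], [5, 1]]

def Spec_setFreqAc (tbDados : List (List Int)) (out : List (List Int)) : Prop := out = setFreqAc_alt tbDados
instance (tbDados : List (List Int)) (out : List (List Int)) : Decidable (Spec_setFreqAc tbDados out) := by unfold Spec_setFreqAc; infer_instance

-- ===== CLAIM (what is proved, stated in full; the proofs are below) =====
def Claim_equal_setFreqAc : Prop := ∀ (tbDados : List (List Int)), Dom_setFreqAc tbDados → Pre_setFreqAc tbDados → Spec_setFreqAc tbDados (setFreqAc tbDados)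

-- ===== LEMMAS AND PROOFS =====
theorem setFreqAcBack_append (xs : List (List Int)) (r : List Int) : ∀ rem : Int,
    setFreqAcBack rem (xs ++ [r])
      = setFreqAcBack rem xs
          ++ [r ++ [rem - (xs.map (fun s => (PySem.List.pyGet? s 1).getD 0)).sum]] := by
  induction xs with
  | nil => intro rem; simp [setFreqAcBack]
  | cons x xs ih =>
      intro rem
      simp only [List.cons_append, setFreqAcBack, ih, List.map_cons, List.sum_cons, sub_sub]

theorem setFreqAcGo_eq_back (tb : List (List Int)) : ∀ ac : Int,
    setFreqAcGo ac tb
      = (setFreqAcBack (ac + (tb.map (fun r => (PySem.List.pyGet? r 1).getD 0)).sum)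
            tb.reverse).reverse := by
  induction tb with
  | nil => intro ac; rfl
  | cons r rs ih =>
      intro ac
      simp only [setFreqAcGo, List.reverse_cons, setFreqAcBack_append, List.reverse_append,
        List.map_cons, List.sum_cons, List.map_reverse, List.sum_reverse, List.reverse_nil,
        List.nil_append, List.singleton_append]
      rw [ih (ac + (PySem.List.pyGet? r 1).getD 0), ← add_assoc, add_sub_cancel_right]

-- ===== VERDICT (by name: the statement is the Claim_ definition above) =====
theorem setFreqAc_spec : Claim_equal_setFreqAc := by
  intro tb _ _
  unfold Spec_setFreqAc setFreqAc setFreqAc_alt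
  simpa using setFreqAcGo_eq_back tb 0
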